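-- pv_equiv track=rewrite | github.com/HWDigi/Camera_Factory_Station | factory_camera_operator.py | analyze_prompt_context
-- ===== SOURCE A (Python) =====
-- def analyze_prompt_context(prompt):
--     """Analyze the base prompt to understand the scene context"""
--     prompt_lower = prompt.lower()
--
--     context = {
--         "subject_type": "person",  # default
--         "scene_type": "portrait",  # default
--         "environment": "indoor",   # default
--         "mood": "neutral",         # default
--         "activity": "static"       # default
--     }
--
--     # Detect subject type
--     if any(word in prompt_lower for word in ["1girl", "1boy", "person", "character", "portrait"]):
--         context["subject_type"] = "person"
--     elif any(word in prompt_lower for word in ["landscape", "scenery", "nature", "building"]):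
--         context["subject_type"] = "environment"
--     elif any(word in prompt_lower for word in ["product", "object", "item", "still_life"]):
--         context["subject_type"] = "object"
--
--     # Detect scene type
--     if any(word in prompt_lower for word in ["close", "face", "head", "portrait"]):
--         context["scene_type"] = "portrait"
--     elif any(word in prompt_lower for word in ["full_body", "standing", "sitting", "pose"]):
--         context["scene_type"] = "full_figure"
--     elif any(word in prompt_lower for word in ["landscape", "wide", "environment", "scenery"]):
--         context["scene_type"] = "landscape"
--     elif any(word in prompt_lower for word in ["product", "commercial", "advertising"]):
--         context["scene_type"] = "product"
--
--     # Detect environment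
--     if any(word in prompt_lower for word in ["outdoor", "outside", "nature", "park", "street"]):
--         context["environment"] = "outdoor"
--     elif any(word in prompt_lower for word in ["indoor", "inside", "room", "office", "studio"]):
--         context["environment"] = "indoor"
--
--     # Detect mood
--     if any(word in prompt_lower for word in ["dramatic", "dark", "moody", "intense"]):
--         context["mood"] = "dramatic"
--     elif any(word in prompt_lower for word in ["bright", "happy", "cheerful", "light"]):
--         context["mood"] = "bright"
--     elif any(word in prompt_lower for word in ["romantic", "soft", "gentle", "intimate"]):
--         context["mood"] = "romantic"
--
--     # Detect activity
--     if any(word in prompt_lower for word in ["running", "jumping", "dancing", "moving", "action"]):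
--         context["activity"] = "dynamic"
--     elif any(word in prompt_lower for word in ["sitting", "standing", "posing", "static"]):
--         context["activity"] = "static"
--
--     return context
-- ===== SOURCE B (Python) =====
-- # Inverted index: one flat keyword table scanned once; no per-category if/elif chains.
-- KEYWORD_TABLE = [
--     # subject_type
--     ("1girl", "subject_type", "person"), ("1boy", "subject_type", "person"),
--     ("person", "subject_type", "person"), ("character", "subject_type", "person"),
--     ("portrait", "subject_type", "person"),
--     ("landscape", "subject_type", "environment"), ("scenery", "subject_type", "environment"),
--     ("nature", "subject_type", "environment"), ("building", "subject_type", "environment"),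
--     ("product", "subject_type", "object"), ("object", "subject_type", "object"),
--     ("item", "subject_type", "object"), ("still_life", "subject_type", "object"),
--     # scene_type
--     ("close", "scene_type", "portrait"), ("face", "scene_type", "portrait"),
--     ("head", "scene_type", "portrait"), ("portrait", "scene_type", "portrait"),
--     ("full_body", "scene_type", "full_figure"), ("standing", "scene_type", "full_figure"),
--     ("sitting", "scene_type", "full_figure"), ("pose", "scene_type", "full_figure"),
--     ("landscape", "scene_type", "landscape"), ("wide", "scene_type", "landscape"),
--     ("environment", "scene_type", "landscape"), ("scenery", "scene_type", "landscape"),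
--     ("product", "scene_type", "product"), ("commercial", "scene_type", "product"),
--     ("advertising", "scene_type", "product"),
--     # environment
--     ("outdoor", "environment", "outdoor"), ("outside", "environment", "outdoor"),
--     ("nature", "environment", "outdoor"), ("park", "environment", "outdoor"),
--     ("street", "environment", "outdoor"),
--     ("indoor", "environment", "indoor"), ("inside", "environment", "indoor"),
--     ("room", "environment", "indoor"), ("office", "environment", "indoor"),
--     ("studio", "environment", "indoor"),
--     # mood
--     ("dramatic", "mood", "dramatic"), ("dark", "mood", "dramatic"),
--     ("moody", "mood", "dramatic"), ("intense", "mood", "dramatic"),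
--     ("bright", "mood", "bright"), ("happy", "mood", "bright"),
--     ("cheerful", "mood", "bright"), ("light", "mood", "bright"),
--     ("romantic", "mood", "romantic"), ("soft", "mood", "romantic"),
--     ("gentle", "mood", "romantic"), ("intimate", "mood", "romantic"),
--     # activity
--     ("running", "activity", "dynamic"), ("jumping", "activity", "dynamic"),
--     ("dancing", "activity", "dynamic"), ("moving", "activity", "dynamic"),
--     ("action", "activity", "dynamic"),
--     ("sitting", "activity", "static"), ("standing", "activity", "static"),
--     ("posing", "activity", "static"), ("static", "activity", "static"),
-- ]
--
-- DEFAULTS = [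
--     ("subject_type", "person"),
--     ("scene_type", "portrait"),
--     ("environment", "indoor"),
--     ("mood", "neutral"),
--     ("activity", "static"),
-- ]
--
--
-- def analyze_prompt_context(prompt):
--     """Analyze the base prompt to understand the scene context"""
--     prompt_lower = prompt.lower()
--     matched = [(cat, val) for kw, cat, val in KEYWORD_TABLE if kw in prompt_lower]
--     return {key: next((v for c, v in matched if c == key), default)
--             for key, default in DEFAULTS}
-- ===== Notes on version B (the rewrite author's own statement) =====
-- stated objective: alternative
-- what changed: Replaces the five hard-coded if/elif keyword-group chains over a mutable dict by an inverted index: a flat keyword->(category,value) table filtered once against the prompt, with each category's value taken as the first hit for that category (defaults otherwise).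
import Mathlib
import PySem

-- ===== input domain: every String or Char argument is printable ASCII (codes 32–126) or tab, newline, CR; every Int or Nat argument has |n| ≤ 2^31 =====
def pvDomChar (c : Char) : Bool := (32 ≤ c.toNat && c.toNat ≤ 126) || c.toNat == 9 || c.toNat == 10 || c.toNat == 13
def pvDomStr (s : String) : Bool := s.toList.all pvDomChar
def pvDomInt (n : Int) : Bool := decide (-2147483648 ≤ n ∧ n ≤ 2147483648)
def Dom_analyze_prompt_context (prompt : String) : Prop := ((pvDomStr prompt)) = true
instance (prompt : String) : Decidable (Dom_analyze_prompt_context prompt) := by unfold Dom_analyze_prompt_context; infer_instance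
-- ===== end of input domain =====

-- B replaces A's five if/elif keyword-group chains by a flat inverted keyword index filtered once, first hit per category; objective: alternative.


-- ===== PORT A =====
-- `any(word in prompt_lower for word in ws)` as A writes it
def anyWordIn (ws : List String) (p : String) : Bool := ws.any (fun w => PySem.Str.isIn w p)

-- # Detect subject type
def detectSubject (prompt_lower : String) (context : PySem.Dict String String) : PySem.Dict String String :=
  if anyWordIn ["1girl", "1boy", "person", "character", "portrait"] prompt_lower then
    context.insert "subject_type" "person"
  else if anyWordIn ["landscape", "scenery", "nature", "building"] prompt_lower then
    context.insert "subject_type" "environment"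
  else if anyWordIn ["product", "object", "item", "still_life"] prompt_lower then
    context.insert "subject_type" "object"
  else context

-- # Detect scene type
def detectScene (prompt_lower : String) (context : PySem.Dict String String) : PySem.Dict String String :=
  if anyWordIn ["close", "face", "head", "portrait"] prompt_lower then
    context.insert "scene_type" "portrait"
  else if anyWordIn ["full_body", "standing", "sitting", "pose"] prompt_lower then
    context.insert "scene_type" "full_figure"
  else if anyWordIn ["landscape", "wide", "environment", "scenery"] prompt_lower then
    context.insert "scene_type" "landscape"
  else if anyWordIn ["product", "commercial", "advertising"] prompt_lower then
    context.insert "scene_type" "product"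
  else context

-- # Detect environment
def detectEnvironment (prompt_lower : String) (context : PySem.Dict String String) : PySem.Dict String String :=
  if anyWordIn ["outdoor", "outside", "nature", "park", "street"] prompt_lower then
    context.insert "environment" "outdoor"
  else if anyWordIn ["indoor", "inside", "room", "office", "studio"] prompt_lower then
    context.insert "environment" "indoor"
  else context

-- # Detect mood
def detectMood (prompt_lower : String) (context : PySem.Dict String String) : PySem.Dict String String :=
  if anyWordIn ["dramatic", "dark", "moody", "intense"] prompt_lower then
    context.insert "mood" "dramatic"
  else if anyWordIn ["bright", "happy", "cheerful", "light"] prompt_lower then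
    context.insert "mood" "bright"
  else if anyWordIn ["romantic", "soft", "gentle", "intimate"] prompt_lower then
    context.insert "mood" "romantic"
  else context

-- # Detect activity
def detectActivity (prompt_lower : String) (context : PySem.Dict String String) : PySem.Dict String String :=
  if anyWordIn ["running", "jumping", "dancing", "moving", "action"] prompt_lower then
    context.insert "activity" "dynamic"
  else if anyWordIn ["sitting", "standing", "posing", "static"] prompt_lower then
    context.insert "activity" "static"
  else context

def analyze_prompt_context (prompt : String) : List (String × String) :=
  let prompt_lower := PySem.Str.lower prompt
  let context : PySem.Dict String String := PySem.Dict.ofList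
    [("subject_type", "person"), ("scene_type", "portrait"), ("environment", "indoor"),
     ("mood", "neutral"), ("activity", "static")]
  let context := detectSubject prompt_lower context
  let context := detectScene prompt_lower context
  let context := detectEnvironment prompt_lower context
  let context := detectMood prompt_lower context
  let context := detectActivity prompt_lower context
  context.items

-- ===== PORT B =====
-- the flat inverted index KEYWORD_TABLE of Source B: (keyword, category, value)
def keywordTable : List (String × String × String) :=
  [("1girl", "subject_type", "person"), ("1boy", "subject_type", "person"),
   ("person", "subject_type", "person"), ("character", "subject_type", "person"),
   ("portrait", "subject_type", "person"),
   ("landscape", "subject_type", "environment"), ("scenery", "subject_type", "environment"),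
   ("nature", "subject_type", "environment"), ("building", "subject_type", "environment"),
   ("product", "subject_type", "object"), ("object", "subject_type", "object"),
   ("item", "subject_type", "object"), ("still_life", "subject_type", "object"),
   ("close", "scene_type", "portrait"), ("face", "scene_type", "portrait"),
   ("head", "scene_type", "portrait"), ("portrait", "scene_type", "portrait"),
   ("full_body", "scene_type", "full_figure"), ("standing", "scene_type", "full_figure"),
   ("sitting", "scene_type", "full_figure"), ("pose", "scene_type", "full_figure"),
   ("landscape", "scene_type", "landscape"), ("wide", "scene_type", "landscape"),
   ("environment", "scene_type", "landscape"), ("scenery", "scene_type", "landscape"),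
   ("product", "scene_type", "product"), ("commercial", "scene_type", "product"),
   ("advertising", "scene_type", "product"),
   ("outdoor", "environment", "outdoor"), ("outside", "environment", "outdoor"),
   ("nature", "environment", "outdoor"), ("park", "environment", "outdoor"),
   ("street", "environment", "outdoor"),
   ("indoor", "environment", "indoor"), ("inside", "environment", "indoor"),
   ("room", "environment", "indoor"), ("office", "environment", "indoor"),
   ("studio", "environment", "indoor"),
   ("dramatic", "mood", "dramatic"), ("dark", "mood", "dramatic"),
   ("moody", "mood", "dramatic"), ("intense", "mood", "dramatic"),
   ("bright", "mood", "bright"), ("happy", "mood", "bright"),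
   ("cheerful", "mood", "bright"), ("light", "mood", "bright"),
   ("romantic", "mood", "romantic"), ("soft", "mood", "romantic"),
   ("gentle", "mood", "romantic"), ("intimate", "mood", "romantic"),
   ("running", "activity", "dynamic"), ("jumping", "activity", "dynamic"),
   ("dancing", "activity", "dynamic"), ("moving", "activity", "dynamic"),
   ("action", "activity", "dynamic"),
   ("sitting", "activity", "static"), ("standing", "activity", "static"),
   ("posing", "activity", "static"), ("static", "activity", "static")]

def defaultsTable : List (String × String) :=
  [("subject_type", "person"), ("scene_type", "portrait"), ("environment", "indoor"),
   ("mood", "neutral"), ("activity", "static")]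

-- next((v for c, v in matched if c == key), default) minus the default: first hit for key
def firstVal (key : String) : List (String × String) → Option String
  | [] => none
  | (c, v) :: rest => if c == key then some v else firstVal key rest

def analyze_prompt_context_alt (prompt : String) : List (String × String) :=
  let prompt_lower := PySem.Str.lower prompt
  let matched := (keywordTable.filter (fun e => PySem.Str.isIn e.1 prompt_lower)).map (fun e => e.2)
  defaultsTable.map (fun kd => (kd.1, (firstVal kd.1 matched).getD kd.2))

-- ===== PRECONDITION & SPEC =====
def Spec_analyze_prompt_context (prompt : String) (out : List (String × String)) : Prop := out = analyze_prompt_context_alt prompt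
instance (prompt : String) (out : List (String × String)) : Decidable (Spec_analyze_prompt_context prompt out) := by unfold Spec_analyze_prompt_context; infer_instance

-- ===== CLAIM =====
def Claim_equal_analyze_prompt_context : Prop := ∀ (prompt : String), Dom_analyze_prompt_context prompt → Spec_analyze_prompt_context prompt (analyze_prompt_context prompt)

-- ===== LEMMAS AND PROOFS =====

-- the context dict with arbitrary values in its five fixed slots
def D5 (a b c d e : String) : PySem.Dict String String :=
  PySem.Dict.mk [("subject_type", a), ("scene_type", b), ("environment", c), ("mood", d), ("activity", e)]

lemma detectSubject_D5 (p a b c d e : String) :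
    detectSubject p (D5 a b c d e) =
      D5 (if anyWordIn ["1girl", "1boy", "person", "character", "portrait"] p then "person"
          else if anyWordIn ["landscape", "scenery", "nature", "building"] p then "environment"
          else if anyWordIn ["product", "object", "item", "still_life"] p then "object"
          else a) b c d e := by
  unfold detectSubject; split_ifs <;> rfl

lemma detectScene_D5 (p a b c d e : String) :
    detectScene p (D5 a b c d e) =
      D5 a (if anyWordIn ["close", "face", "head", "portrait"] p then "portrait"
            else if anyWordIn ["full_body", "standing", "sitting", "pose"] p then "full_figure"
            else if anyWordIn ["landscape", "wide", "environment", "scenery"] p then "landscape"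
            else if anyWordIn ["product", "commercial", "advertising"] p then "product"
            else b) c d e := by
  unfold detectScene; split_ifs <;> rfl

lemma detectEnvironment_D5 (p a b c d e : String) :
    detectEnvironment p (D5 a b c d e) =
      D5 a b (if anyWordIn ["outdoor", "outside", "nature", "park", "street"] p then "outdoor"
              else if anyWordIn ["indoor", "inside", "room", "office", "studio"] p then "indoor"
              else c) d e := by
  unfold detectEnvironment; split_ifs <;> rfl

lemma detectMood_D5 (p a b c d e : String) :
    detectMood p (D5 a b c d e) =
      D5 a b c (if anyWordIn ["dramatic", "dark", "moody", "intense"] p then "dramatic"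
                else if anyWordIn ["bright", "happy", "cheerful", "light"] p then "bright"
                else if anyWordIn ["romantic", "soft", "gentle", "intimate"] p then "romantic"
                else d) e := by
  unfold detectMood; split_ifs <;> rfl

lemma detectActivity_D5 (p a b c d e : String) :
    detectActivity p (D5 a b c d e) =
      D5 a b c d (if anyWordIn ["running", "jumping", "dancing", "moving", "action"] p then "dynamic"
                  else if anyWordIn ["sitting", "standing", "posing", "static"] p then "static"
                  else e) := by
  unfold detectActivity; split_ifs <;> rfl

-- B's matched list restricted to one table segment
def M (p : String) (xs : List (String × String × String)) : List (String × String) :=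
  (xs.filter (fun e => PySem.Str.isIn e.1 p)).map (fun e => e.2)

def seg (ws : List String) (c v : String) : List (String × String × String) :=
  ws.map (fun w => (w, c, v))

lemma M_append (p : String) (xs ys : List (String × String × String)) :
    M p (xs ++ ys) = M p xs ++ M p ys := by
  simp [M, List.filter_append]

lemma firstVal_append (key : String) (xs ys : List (String × String)) :
    firstVal key (xs ++ ys) = (firstVal key xs).orElse (fun _ => firstVal key ys) := by
  induction xs with
  | nil => rfl
  | cons h t ih =>
    obtain ⟨c, v⟩ := h
    by_cases hc : (c == key) = true <;> simp [firstVal, hc, ih]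

lemma firstVal_seg_ne (p key c v : String) (h : (c == key) = false) (ws : List String) :
    firstVal key (M p (seg ws c v)) = none := by
  induction ws with
  | nil => rfl
  | cons w t ih =>
    simp only [seg, List.map_cons, M, List.filter_cons] at ih ⊢
    by_cases hw : PySem.Str.isIn w p = true
    · simp only [hw, if_true, List.map_cons, firstVal, h]
      exact ih
    · simp only [Bool.not_eq_true] at hw
      simp only [hw, Bool.false_eq_true, if_false]
      exact ih

lemma firstVal_seg_eq (p key v : String) (ws : List String) :
    firstVal key (M p (seg ws key v)) =
      (if ws.any (fun w => PySem.Str.isIn w p) then some v else none) := by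
  induction ws with
  | nil => rfl
  | cons w t ih =>
    simp only [seg, List.map_cons, M, List.filter_cons, List.any_cons] at ih ⊢
    by_cases hw : PySem.Str.isIn w p = true
    · have hw' : PySem.Chars.isIn w.toList p.toList = true := hw
      simp [hw', firstVal]
    · simp only [Bool.not_eq_true] at hw
      simp only [hw, Bool.false_eq_true, if_false, Bool.false_or]
      exact ih

-- keywordTable as 14 rule segments
lemma kt_decomp : keywordTable =
    seg ["1girl", "1boy", "person", "character", "portrait"] "subject_type" "person" ++
    seg ["landscape", "scenery", "nature", "building"] "subject_type" "environment" ++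
    seg ["product", "object", "item", "still_life"] "subject_type" "object" ++
    seg ["close", "face", "head", "portrait"] "scene_type" "portrait" ++
    seg ["full_body", "standing", "sitting", "pose"] "scene_type" "full_figure" ++
    seg ["landscape", "wide", "environment", "scenery"] "scene_type" "landscape" ++
    seg ["product", "commercial", "advertising"] "scene_type" "product" ++
    seg ["outdoor", "outside", "nature", "park", "street"] "environment" "outdoor" ++
    seg ["indoor", "inside", "room", "office", "studio"] "environment" "indoor" ++
    seg ["dramatic", "dark", "moody", "intense"] "mood" "dramatic" ++
    seg ["bright", "happy", "cheerful", "light"] "mood" "bright" ++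
    seg ["romantic", "soft", "gentle", "intimate"] "mood" "romantic" ++
    seg ["running", "jumping", "dancing", "moving", "action"] "activity" "dynamic" ++
    seg ["sitting", "standing", "posing", "static"] "activity" "static" := by rfl

lemma fv_subject (p : String) :
    (firstVal "subject_type" (M p keywordTable)).getD "person" =
      (if anyWordIn ["1girl", "1boy", "person", "character", "portrait"] p then "person"
       else if anyWordIn ["landscape", "scenery", "nature", "building"] p then "environment"
       else if anyWordIn ["product", "object", "item", "still_life"] p then "object"
       else "person") := by
  rw [kt_decomp]
  simp only [M_append, firstVal_append]
  simp [firstVal_seg_eq, firstVal_seg_ne, anyWordIn]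
  split_ifs <;> simp_all

lemma fv_scene (p : String) :
    (firstVal "scene_type" (M p keywordTable)).getD "portrait" =
      (if anyWordIn ["close", "face", "head", "portrait"] p then "portrait"
       else if anyWordIn ["full_body", "standing", "sitting", "pose"] p then "full_figure"
       else if anyWordIn ["landscape", "wide", "environment", "scenery"] p then "landscape"
       else if anyWordIn ["product", "commercial", "advertising"] p then "product"
       else "portrait") := by
  rw [kt_decomp]
  simp only [M_append, firstVal_append]
  simp [firstVal_seg_eq, firstVal_seg_ne, anyWordIn]
  split_ifs <;> simp_all

lemma fv_environment (p : String) :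
    (firstVal "environment" (M p keywordTable)).getD "indoor" =
      (if anyWordIn ["outdoor", "outside", "nature", "park", "street"] p then "outdoor"
       else if anyWordIn ["indoor", "inside", "room", "office", "studio"] p then "indoor"
       else "indoor") := by
  rw [kt_decomp]
  simp only [M_append, firstVal_append]
  simp [firstVal_seg_eq, firstVal_seg_ne, anyWordIn]
  split_ifs <;> simp_all

lemma fv_mood (p : String) :
    (firstVal "mood" (M p keywordTable)).getD "neutral" =
      (if anyWordIn ["dramatic", "dark", "moody", "intense"] p then "dramatic"
       else if anyWordIn ["bright", "happy", "cheerful", "light"] p then "bright"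
       else if anyWordIn ["romantic", "soft", "gentle", "intimate"] p then "romantic"
       else "neutral") := by
  rw [kt_decomp]
  simp only [M_append, firstVal_append]
  simp [firstVal_seg_eq, firstVal_seg_ne, anyWordIn]
  split_ifs <;> simp_all

lemma fv_activity (p : String) :
    (firstVal "activity" (M p keywordTable)).getD "static" =
      (if anyWordIn ["running", "jumping", "dancing", "moving", "action"] p then "dynamic"
       else if anyWordIn ["sitting", "standing", "posing", "static"] p then "static"
       else "static") := by
  rw [kt_decomp]
  simp only [M_append, firstVal_append]
  simp [firstVal_seg_eq, firstVal_seg_ne, anyWordIn]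
  split_ifs <;> simp_all

-- ===== VERDICT =====
theorem analyze_prompt_context_spec : Claim_equal_analyze_prompt_context := by
  intro prompt _
  unfold Spec_analyze_prompt_context analyze_prompt_context analyze_prompt_context_alt
  show (detectActivity _ (detectMood _ (detectEnvironment _ (detectScene _ (detectSubject _
        (D5 "person" "portrait" "indoor" "neutral" "static")))))).items =
    defaultsTable.map (fun kd => (kd.1, (firstVal kd.1 (M (PySem.Str.lower prompt) keywordTable)).getD kd.2))
  rw [detectSubject_D5, detectScene_D5, detectEnvironment_D5, detectMood_D5, detectActivity_D5]
  show _ = [("subject_type", (firstVal "subject_type" (M (PySem.Str.lower prompt) keywordTable)).getD "person"),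
            ("scene_type", (firstVal "scene_type" (M (PySem.Str.lower prompt) keywordTable)).getD "portrait"),
            ("environment", (firstVal "environment" (M (PySem.Str.lower prompt) keywordTable)).getD "indoor"),
            ("mood", (firstVal "mood" (M (PySem.Str.lower prompt) keywordTable)).getD "neutral"),
            ("activity", (firstVal "activity" (M (PySem.Str.lower prompt) keywordTable)).getD "static")]
  rw [fv_subject, fv_scene, fv_environment, fv_mood, fv_activity]
  rfl
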